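-- pv_equiv track=rewrite | github.com/FPSarmin/HSECAOS | Algos/CW-1/D.py | check
-- ===== SOURCE A (Python) =====
-- def check(a, m, n):
--     lines = 0
--     i = 0
--     while i < len(a):
--         temp = 0
--         while i < len(a) and temp + len(a[i]) <= m:
--             temp += len(a[i])
--             temp += 1
--             i += 1
--         lines += 1
--         if i < len(a) and m < len(a[i]):
--             return True
--     return lines > n
-- ===== SOURCE B (Python) =====
-- def check(a, m, n):
--     # two-pass: reject oversized words first, then count lines with a flat greedy fold
--     if any(len(w) > m for w in a):
--         return True
--     lines = 0
--     width = m + 1  # sentinel: forces the first word to open a new line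
--     for w in a:
--         if width + len(w) <= m:
--             width += len(w) + 1
--         else:
--             lines += 1
--             width = len(w) + 1
--     return lines > n
-- ===== Notes on version B (the rewrite author's own statement) =====
-- stated objective: simpler
-- what changed: Replaces A's nested while-loops with manual index juggling and an in-loop oversized check by a two-pass decomposition: a flat any() pass rejecting words wider than a line, then a single fold over the words counting lines with a running width.
import Mathlib
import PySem

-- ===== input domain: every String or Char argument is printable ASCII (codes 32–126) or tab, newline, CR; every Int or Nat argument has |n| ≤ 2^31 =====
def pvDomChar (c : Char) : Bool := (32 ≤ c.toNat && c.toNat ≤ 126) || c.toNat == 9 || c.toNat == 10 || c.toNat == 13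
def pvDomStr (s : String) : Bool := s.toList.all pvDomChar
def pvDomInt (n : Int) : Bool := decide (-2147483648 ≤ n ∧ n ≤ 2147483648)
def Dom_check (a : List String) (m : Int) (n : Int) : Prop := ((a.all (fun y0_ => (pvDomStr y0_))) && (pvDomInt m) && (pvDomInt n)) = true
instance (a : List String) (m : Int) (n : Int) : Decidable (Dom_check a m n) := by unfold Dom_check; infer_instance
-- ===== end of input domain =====

-- B is a simpler two-pass decomposition (flat oversized-word guard, then one greedy fold); A's nested while-loops are ported literally
-- (each while becomes a fuel-bounded structural recursion; the fuel is a totality device only and is provably sufficient).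

-- ===== PORT A =====
-- inner 'while i < len(a) and temp + len(a[i]) <= m' loop of A; returns the final (i, temp).
-- fuel only makes the recursion structural: each step advances i, so fuel = a.length - i never runs out mid-loop.
def checkInner (a : List String) (m : Int) : Nat → Nat → Int → Nat × Int
  | 0, i, temp => (i, temp)
  | fuel + 1, i, temp =>
    if h : i < a.length then
      if temp + PySem.Str.len a[i] ≤ m then
        checkInner a m fuel (i + 1) (temp + PySem.Str.len a[i] + 1)
      else (i, temp)
    else (i, temp)

-- outer 'while i < len(a)' loop of A; called with fuel = a.length + 1, which is provably enough
-- (each iteration either returns, advances i, or reaches the end; fuel 0 coincides with the exit branch)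
def checkOuter (a : List String) (m : Int) (n : Int) : Nat → Nat → Int → Bool
  | 0, _, lines => decide (lines > n)
  | fuel + 1, i, lines =>
    if h : i < a.length then
      if h' : (checkInner a m (a.length - i) i 0).1 < a.length then
        if m < PySem.Str.len a[(checkInner a m (a.length - i) i 0).1] then true
        else checkOuter a m n fuel (checkInner a m (a.length - i) i 0).1 (lines + 1)
      else checkOuter a m n fuel (checkInner a m (a.length - i) i 0).1 (lines + 1)
    else decide (lines > n)

def check (a : List String) (m : Int) (n : Int) : Bool :=
  checkOuter a m n (a.length + 1) 0 0

-- ===== PORT B =====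
-- one greedy fold step: extend the current line if the word fits, else open a new line
def altStep (m : Int) (p : Int × Int) (w : String) : Int × Int :=
  if p.2 + PySem.Str.len w ≤ m then (p.1, p.2 + PySem.Str.len w + 1)
  else (p.1 + 1, PySem.Str.len w + 1)

def check_alt (a : List String) (m : Int) (n : Int) : Bool :=
  if a.any (fun w => m < PySem.Str.len w) then true
  else decide ((a.foldl (altStep m) (0, m + 1)).1 > n)

-- ===== PRECONDITION & SPEC =====
def Spec_check (a : List String) (m : Int) (n : Int) (out : Bool) : Prop := out = check_alt a m n
instance (a : List String) (m : Int) (n : Int) (out : Bool) : Decidable (Spec_check a m n out) := by unfold Spec_check; infer_instance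

-- ===== CLAIM (what is proved, stated in full; the proofs are below) =====
def Claim_equal_check : Prop := ∀ (a : List String) (m : Int) (n : Int), Dom_check a m n → Spec_check a m n (check a m n)

-- ===== LEMMAS AND PROOFS =====

theorem len_nonneg (w : String) : (0:Int) ≤ PySem.Str.len w := by simp [PySem.Str.len_eq]

-- a fold step on a non-fitting width opens a new line regardless of the old width
theorem altStep_nofit (m : Int) (l t : Int) (w : String) (h : ¬ (t + PySem.Str.len w ≤ m)) :
    altStep m (l, t) w = (l + 1, PySem.Str.len w + 1) := by
  simp only [altStep]; rw [if_neg h]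

theorem mem_drop_of_le {α : Type} (a : List α) {i j : Nat} (h : i ≤ j)
    {w : α} (hw : w ∈ a.drop j) : w ∈ a.drop i := by
  have : a.drop j = (a.drop i).drop (j - i) := by rw [List.drop_drop]; congr 1; omega
  rw [this] at hw
  exact List.mem_of_mem_drop hw

-- result index of the inner loop never moves backwards; it stands still only when the body never ran
theorem checkInner_progress (a : List String) (m : Int) (f i : Nat) (temp : Int) :
    (i < (checkInner a m f i temp).1) ∨ checkInner a m f i temp = (i, temp) := by
  induction f generalizing i temp with
  | zero => right; rfl
  | succ f ih =>
    rw [checkInner]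
    by_cases h : i < a.length
    · rw [dif_pos h]
      by_cases hfit : temp + PySem.Str.len a[i] ≤ m
      · rw [if_pos hfit]
        rcases ih (i + 1) (temp + PySem.Str.len a[i] + 1) with h' | h'
        · left; omega
        · left; rw [h']; exact Nat.lt_succ_self i
      · rw [if_neg hfit]; right; rfl
    · rw [dif_neg h]; right; rfl

theorem checkInner_idx_ge (a : List String) (m : Int) (f i : Nat) (temp : Int) :
    i ≤ (checkInner a m f i temp).1 := by
  rcases checkInner_progress a m f i temp with hp | hp
  · omega
  · simp [hp]

-- with enough fuel (a.length ≤ i + f), if the inner loop stopped at an in-range index the word there did not fit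
theorem checkInner_stop (a : List String) (m : Int) (f i : Nat) (temp : Int)
    (hf : a.length ≤ i + f) (w : String) (hw : a[(checkInner a m f i temp).1]? = some w) :
    ¬ ((checkInner a m f i temp).2 + PySem.Str.len w ≤ m) := by
  induction f generalizing i temp with
  | zero =>
    rw [checkInner] at hw
    have h2 : a[i]? = some w := hw
    rw [List.getElem?_eq_none (by omega)] at h2
    exact absurd h2 (by simp)
  | succ f ih =>
    rw [checkInner] at hw ⊢
    by_cases h : i < a.length
    · rw [dif_pos h] at hw ⊢
      by_cases hfit : temp + PySem.Str.len a[i] ≤ m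
      · rw [if_pos hfit] at hw ⊢; exact ih (i + 1) _ (by omega) hw
      · rw [if_neg hfit] at hw ⊢
        have h2 : a[i]? = some w := hw
        rw [List.getElem?_eq_getElem h] at h2
        have h3 : w = a[i] := (Option.some_inj.1 h2).symm
        rw [h3]; exact hfit
    · rw [dif_neg h] at hw ⊢
      have h2 : a[i]? = some w := hw
      rw [List.getElem?_eq_none (by omega)] at h2
      exact absurd h2 (by simp)

theorem checkInner_le_length (a : List String) (m : Int) (f i : Nat) (temp : Int) (h : i ≤ a.length) :
    (checkInner a m f i temp).1 ≤ a.length := by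
  induction f generalizing i temp with
  | zero => exact h
  | succ f ih =>
    rw [checkInner]
    by_cases h1 : i < a.length
    · rw [dif_pos h1]
      by_cases hfit : temp + PySem.Str.len a[i] ≤ m
      · rw [if_pos hfit]; exact ih (i + 1) _ (by omega)
      · rw [if_neg hfit]; exact h
    · rw [dif_neg h1]; exact h

-- any word the inner loop stepped past fitted: its length is ≤ m (given a nonnegative start width)
theorem checkInner_passed (a : List String) (m : Int) (f i : Nat) (temp : Int) (htemp : 0 ≤ temp)
    (j : Nat) (hij : i ≤ j) (hj : j < (checkInner a m f i temp).1) (hlen : j < a.length) :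
    PySem.Str.len a[j] ≤ m := by
  induction f generalizing i temp with
  | zero => rw [checkInner] at hj; omega
  | succ f ih =>
    rw [checkInner] at hj
    by_cases h : i < a.length
    · rw [dif_pos h] at hj
      by_cases hfit : temp + PySem.Str.len a[i] ≤ m
      · rw [if_pos hfit] at hj
        rcases Nat.eq_or_lt_of_le hij with rfl | hlt
        · omega
        · exact ih (i + 1) _ (by have := len_nonneg a[i]; omega) (by omega) hj
      · rw [if_neg hfit] at hj; omega
    · rw [dif_neg h] at hj; omega

-- the inner loop consumes exactly the fold's run of "fits" steps
theorem checkInner_fold (a : List String) (m : Int) (f i : Nat) (temp : Int) (l : Int) :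
    (a.drop i).foldl (altStep m) (l, temp)
      = (a.drop (checkInner a m f i temp).1).foldl (altStep m) (l, (checkInner a m f i temp).2) := by
  induction f generalizing i temp with
  | zero => rfl
  | succ f ih =>
    rw [checkInner]
    by_cases h : i < a.length
    · rw [dif_pos h]
      by_cases hfit : temp + PySem.Str.len a[i] ≤ m
      · rw [if_pos hfit]
        rw [List.drop_eq_getElem_cons h, List.foldl_cons]
        rw [show altStep m (l, temp) a[i] = (l, temp + PySem.Str.len a[i] + 1) by
          simp only [altStep]; rw [if_pos hfit]]
        exact ih (i + 1) _
      · rw [if_neg hfit]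
    · rw [dif_neg h]

-- main invariant: when no remaining word is oversized, the outer loop computes the fold's verdict
theorem checkOuter_fold (a : List String) (m : Int) (n : Int) (f i : Nat) (lines : Int)
    (hf : a.length ≤ i + f)
    (hok : ∀ w ∈ a.drop i, PySem.Str.len w ≤ m) :
    checkOuter a m n f i lines = decide (((a.drop i).foldl (altStep m) (lines, m + 1)).1 > n) := by
  induction f generalizing i lines with
  | zero =>
    rw [checkOuter, List.drop_eq_nil_of_le (by omega), List.foldl_nil]
  | succ f ih =>
    rw [checkOuter]
    by_cases h : i < a.length
    · rw [dif_pos h]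
      have hlen0 : 0 + PySem.Str.len a[i] ≤ m := by
        have hm : a[i] ∈ a.drop i := by
          rw [List.mem_iff_getElem]; exact ⟨0, by simp; omega, by simp [List.getElem_drop]⟩
        have := hok _ hm; omega
      -- the first fold step opens the line exactly as the inner loop's first (fitting) step does
      have hstep : (a.drop i).foldl (altStep m) (lines, m + 1)
          = (a.drop (i+1)).foldl (altStep m) (lines + 1, PySem.Str.len a[i] + 1) := by
        rw [List.drop_eq_getElem_cons h, List.foldl_cons,
            altStep_nofit m lines (m+1) a[i] (by have := len_nonneg a[i]; omega)]
      have hinner : checkInner a m (a.length - i) i 0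
          = checkInner a m (a.length - (i+1)) (i+1) (PySem.Str.len a[i] + 1) := by
        rw [show a.length - i = (a.length - (i+1)) + 1 by omega, checkInner, dif_pos h, if_pos hlen0]
        norm_num
      set p := checkInner a m (a.length - i) i 0 with hp
      have hfold := checkInner_fold a m (a.length - (i+1)) (i+1) (PySem.Str.len a[i] + 1) (lines + 1)
      rw [← hinner] at hfold
      by_cases h' : p.1 < a.length
      · rw [dif_pos h']
        have hw : a[p.1]? = some a[p.1] := List.getElem?_eq_getElem h'
        have hstop := checkInner_stop a m (a.length - i) i 0 (by omega) a[p.1] (by rw [← hp]; exact hw)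
        rw [← hp] at hstop
        have hge : i ≤ p.1 := by rw [hp]; exact checkInner_idx_ge a m (a.length - i) i 0
        have hbig : ¬ m < PySem.Str.len a[p.1] := by
          have hm : a[p.1] ∈ a.drop i := by
            apply mem_drop_of_le a hge
            rw [List.mem_iff_getElem]
            exact ⟨0, by simp; omega, by simp [List.getElem_drop]⟩
          have := hok _ hm; omega
        rw [if_neg hbig]
        -- progress: the stopped word fits on an empty line (hbig) but not on this one (hstop), so the loop ran
        have hprog : i < p.1 := by
          rcases checkInner_progress a m (a.length - i) i 0 with hpr | hpr
          · rw [hp]; exact hpr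
          · exfalso
            have h2 : p.2 = 0 := by rw [hp, hpr]
            rw [h2] at hstop
            omega
        rw [ih p.1 (lines + 1) (by omega)
            (fun w hw => hok w (mem_drop_of_le a (by omega) hw))]
        rw [hstep, hfold]
        rw [List.drop_eq_getElem_cons h', List.foldl_cons, List.foldl_cons,
            altStep_nofit m (lines+1) _ _ hstop,
            altStep_nofit m (lines+1) (m+1) _ (by have := len_nonneg a[p.1]; omega)]
      · rw [dif_neg h']
        have hp1 : p.1 = a.length := by
          have := checkInner_le_length a m (a.length - i) i 0 (by omega)
          rw [← hp] at this; omega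
        rw [ih p.1 (lines + 1) (by omega) (by intro w hw; rw [hp1, List.drop_eq_nil_of_le (by omega)] at hw; simp at hw)]
        rw [hstep, hfold, hp1, List.drop_length, List.foldl_nil, List.foldl_nil]
    · rw [dif_neg h]
      rw [List.drop_eq_nil_of_le (by omega), List.foldl_nil]

-- when some remaining word is oversized, A returns true
theorem checkOuter_oversized (a : List String) (m : Int) (n : Int) (f i : Nat) (lines : Int)
    (hf : a.length ≤ i + f)
    (hbad : ∃ w ∈ a.drop i, m < PySem.Str.len w) :
    checkOuter a m n f i lines = true := by
  induction f generalizing i lines with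
  | zero =>
    exfalso
    obtain ⟨w, hw, _⟩ := hbad
    rw [List.drop_eq_nil_of_le (by omega)] at hw
    simp at hw
  | succ f ih =>
    rw [checkOuter]
    by_cases h : i < a.length
    · rw [dif_pos h]
      set p := checkInner a m (a.length - i) i 0 with hp
      obtain ⟨w, hw, hwbig⟩ := hbad
      obtain ⟨k, hk, hkw⟩ := List.mem_iff_getElem.1 hw
      rw [List.getElem_drop] at hkw
      simp at hk
      by_cases h' : p.1 < a.length
      · rw [dif_pos h']
        by_cases hbig : m < PySem.Str.len a[p.1]
        · rw [if_pos hbig]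
        · rw [if_neg hbig]
          have hw' : a[p.1]? = some a[p.1] := List.getElem?_eq_getElem h'
          have hstop := checkInner_stop a m (a.length - i) i 0 (by omega) a[p.1] (by rw [← hp]; exact hw')
          rw [← hp] at hstop
          have hprog : i < p.1 := by
            rcases checkInner_progress a m (a.length - i) i 0 with hpr | hpr
            · rw [hp]; exact hpr
            · exfalso
              have h2 : p.2 = 0 := by rw [hp, hpr]
              rw [h2] at hstop
              omega
          apply ih p.1 (lines + 1) (by omega)
          by_cases hcmp : p.1 ≤ i + k
          · refine ⟨w, ?_, hwbig⟩
            rw [List.mem_iff_getElem]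
            refine ⟨i + k - p.1, by simp; omega, ?_⟩
            rw [List.getElem_drop, ← hkw]; congr 1; omega
          · exfalso
            have := checkInner_passed a m (a.length - i) i 0 le_rfl (i + k) (by omega)
              (by rw [← hp] at *; omega) (by omega)
            rw [hkw] at this; omega
      · exfalso
        have hp1 : p.1 = a.length := by
          have := checkInner_le_length a m (a.length - i) i 0 (by omega)
          rw [← hp] at this; omega
        have := checkInner_passed a m (a.length - i) i 0 le_rfl (i + k) (by omega)
          (by rw [← hp] at *; omega) (by omega)
        rw [hkw] at this; omega
    · exfalso
      obtain ⟨w, hw, _⟩ := hbad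
      rw [List.drop_eq_nil_of_le (by omega)] at hw
      simp at hw

-- ===== VERDICT (by name: the statement is the Claim_ definition above) =====
theorem check_spec : Claim_equal_check := by
  intro a m n _
  unfold Spec_check check check_alt
  by_cases hbad : a.any (fun w => m < PySem.Str.len w)
  · rw [if_pos hbad]
    simp only [List.any_eq_true, decide_eq_true_eq] at hbad
    exact checkOuter_oversized a m n (a.length + 1) 0 0 (by omega) (by simpa using hbad)
  · rw [if_neg hbad]
    simp only [List.any_eq_true, decide_eq_true_eq] at hbad
    push Not at hbad
    have hok : ∀ w ∈ a.drop 0, PySem.Str.len w ≤ m := by simpa using hbad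
    rw [checkOuter_fold a m n (a.length + 1) 0 0 (by omega) hok]
    simp
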